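-- pv_equiv track=rewrite | github.com/anonymous0429/code20190420 | .ipynb_checkpoints/ProcessData-checkpoint.py | Split_Title
-- ===== SOURCE A (Python) =====
-- import copy
--
-- def Split_Title(data):
--     data_split=copy.deepcopy(data)
--     Vocab_table=""
--
--     for i in range(len(data_split)):
--         Vocab_table += (data_split[i])
--         Vocab_table += " "
--         data_split[i]=data_split[i].split()
--
--     Vocab_table = Vocab_table.split()
--     return Vocab_table,data_split
-- ===== SOURCE B (Python) =====
-- def Split_Title(data):
--     data_split = [title.split() for title in data]
--     Vocab_table = [word for words in data_split for word in words]
--     return Vocab_table, data_split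
-- ===== Notes on version B (the rewrite author's own statement) =====
-- stated objective: simpler
-- what changed: B splits each title once and flattens the per-title word lists for the vocabulary, instead of deep-copying, concatenating all titles into one big string and re-splitting it.
import Mathlib
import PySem

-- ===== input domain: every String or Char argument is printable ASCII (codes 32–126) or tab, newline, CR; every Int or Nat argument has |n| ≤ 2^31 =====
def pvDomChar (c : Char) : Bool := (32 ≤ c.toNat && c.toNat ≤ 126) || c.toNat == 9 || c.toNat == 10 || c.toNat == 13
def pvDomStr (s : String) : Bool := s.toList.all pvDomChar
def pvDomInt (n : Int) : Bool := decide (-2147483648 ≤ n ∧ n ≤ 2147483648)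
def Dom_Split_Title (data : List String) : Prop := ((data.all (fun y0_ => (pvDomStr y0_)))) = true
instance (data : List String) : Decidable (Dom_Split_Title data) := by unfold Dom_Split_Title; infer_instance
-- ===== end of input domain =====

-- B builds each title's word list once and flattens them for the vocabulary, instead of
-- concatenating all titles into one big string and re-splitting it (objective: simpler).

-- ===== PORT A =====
-- A: accumulate Vocab_table (a growing string, kept as List Char) and replace each
-- data_split[i] by its .split(); then split the accumulated string.
def Split_Title (data : List String) : List String × List (List String) :=
  let st := data.foldl
    (fun (p : List Char × List (List String)) s =>
      (p.1 ++ s.toList ++ [' '], p.2 ++ [PySem.Str.split₀ s]))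
    ([], [])
  ((PySem.Chars.split₀ st.1).map String.ofList, st.2)

-- ===== PORT B =====
def Split_Title_alt (data : List String) : List String × List (List String) :=
  let dataSplit := data.map PySem.Str.split₀
  (dataSplit.flatten, dataSplit)

-- ===== PRECONDITION & SPEC =====
def Spec_Split_Title (data : List String) (out : List String × List (List String)) : Prop := out = Split_Title_alt data
instance (data : List String) (out : List String × List (List String)) : Decidable (Spec_Split_Title data out) := by unfold Spec_Split_Title; infer_instance

-- ===== CLAIM (what is proved, stated in full; the proofs are below) =====
def Claim_equal_Split_Title : Prop := ∀ (data : List String), Dom_Split_Title data → Spec_Split_Title data (Split_Title data)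

-- ===== LEMMAS AND PROOFS =====

-- The accumulator of go only contributes its reverse in front of the result.
theorem go_acc (b cur acc) :
    PySem.Chars.split₀.go b cur acc = acc.reverse ++ PySem.Chars.split₀.go b cur [] := by
  induction b generalizing cur acc with
  | nil =>
    simp only [PySem.Chars.split₀.go]
    split_ifs <;> simp
  | cons c rest ih =>
    simp only [PySem.Chars.split₀.go]
    split_ifs with h1 h2
    · rw [ih [] acc]
    · rw [ih [] (cur.reverse :: acc), ih [] [cur.reverse]]; simp
    · rw [ih (c :: cur) acc]

-- A ' ' separator splits split₀ into two independent runs.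
theorem go_sep (a b cur acc) :
    PySem.Chars.split₀.go (a ++ ' ' :: b) cur acc =
      PySem.Chars.split₀.go a cur acc ++ PySem.Chars.split₀ b := by
  induction a generalizing cur acc with
  | nil =>
    have hgo : PySem.Chars.split₀.go ([] : List Char) cur acc =
        (if cur.isEmpty then acc.reverse else (cur.reverse :: acc).reverse) := rfl
    simp only [List.nil_append]
    rw [show PySem.Chars.split₀.go (' ' :: b) cur acc =
        (if PySem.Chars.isspace ' ' = true then
          (if cur.isEmpty then PySem.Chars.split₀.go b [] acc
           else PySem.Chars.split₀.go b [] (cur.reverse :: acc))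
         else PySem.Chars.split₀.go b (' ' :: cur) acc) from rfl,
      if_pos (by decide : PySem.Chars.isspace ' ' = true), hgo]
    by_cases h : cur.isEmpty
    · rw [if_pos h, if_pos h, go_acc b [] acc]; rfl
    · rw [if_neg h, if_neg h, go_acc b [] (cur.reverse :: acc)]; simp [PySem.Chars.split₀]
  | cons c rest ih =>
    simp only [List.cons_append, PySem.Chars.split₀.go]
    split_ifs with h1 h2
    · exact ih [] acc
    · exact ih [] (cur.reverse :: acc)
    · exact ih (c :: cur) acc

theorem split₀_sep (a b : List Char) :
    PySem.Chars.split₀ (a ++ ' ' :: b) = PySem.Chars.split₀ a ++ PySem.Chars.split₀ b := by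
  simp only [PySem.Chars.split₀]
  exact go_sep a b [] []

-- A's vocab accumulator is the flatMap of titles each followed by a space.
theorem foldl_vocab (data : List String) (v : List Char) (o : List (List String)) :
    data.foldl (fun (p : List Char × List (List String)) s =>
      (p.1 ++ s.toList ++ [' '], p.2 ++ [PySem.Str.split₀ s])) (v, o) =
      (v ++ data.flatMap (fun s => s.toList ++ [' ']), o ++ data.map PySem.Str.split₀) := by
  induction data generalizing v o with
  | nil => simp
  | cons s rest ih =>
    rw [List.foldl_cons, ih]
    simp

-- Splitting the space-joined concatenation equals the flattened per-title splits.
theorem split₀_flatMap (data : List String) :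
    PySem.Chars.split₀ (data.flatMap (fun s => s.toList ++ [' '])) =
      (data.map (fun s => PySem.Chars.split₀ s.toList)).flatten := by
  induction data with
  | nil => rfl
  | cons s rest ih =>
    have : s.toList ++ [' '] ++ rest.flatMap (fun s => s.toList ++ [' ']) =
        s.toList ++ ' ' :: rest.flatMap (fun s => s.toList ++ [' ']) := by simp
    simp only [List.flatMap_cons, this, split₀_sep, ih, List.map_cons, List.flatten_cons]

-- ===== VERDICT (by name: the statement is the Claim_ definition above) =====
theorem Split_Title_spec : Claim_equal_Split_Title := by
  intro data _
  unfold Spec_Split_Title Split_Title Split_Title_alt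
  simp only [foldl_vocab, List.nil_append, split₀_flatMap]
  refine Prod.ext ?_ rfl
  rw [List.map_flatten, List.map_map]
  exact congrArg List.flatten (List.map_congr_left fun s _ => rfl)
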